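-- pv_equiv track=rewrite | github.com/immAjzner/duvening-bot | main.py | hebrew_year
-- ===== SOURCE A (Python) =====
-- def hebrew_year(y):
--     y %= 1000
--     mapping = [
--         (400,"ת"),(300,"ש"),(200,"ר"),(100,"ק"),
--         (90,"צ"),(80,"פ"),(70,"ע"),(60,"ס"),(50,"נ"),
--         (40,"מ"),(30,"ל"),(20,"כ"),(10,"י"),
--         (9,"ט"),(8,"ח"),(7,"ז"),(6,"ו"),(5,"ה"),
--         (4,"ד"),(3,"ג"),(2,"ב"),(1,"א")
--     ]
--     result = ""
--     for v, l in mapping: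
--         while y >= v:
--             result += l
--             y -= v
--     return result[:-1] + "״" + result[-1]
-- ===== SOURCE B (Python) =====
-- _H = ["", "ק", "ר", "ש", "ת", "תק", "תר", "תש", "תת", "תתק"]
-- _T = ["", "י", "כ", "ל", "מ", "נ", "ס", "ע", "פ", "צ"]
-- _U = ["", "א", "ב", "ג", "ד", "ה", "ו", "ז", "ח", "ט"]
--
-- def hebrew_year(y):
--     y %= 1000
--     result = _H[y // 100] + _T[y // 10 % 10] + _U[y % 10]
--     return result[:-1] + "״" + result[-1]
-- ===== Notes on version B (the rewrite author's own statement) =====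
-- stated objective: simpler
-- what changed: Replaced the greedy subtract-and-append loop over the value/letter table by direct extraction of the three decimal digits of the reduced year and lookup in three precomputed fragment tables (hundreds/tens/units).
import Mathlib
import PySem

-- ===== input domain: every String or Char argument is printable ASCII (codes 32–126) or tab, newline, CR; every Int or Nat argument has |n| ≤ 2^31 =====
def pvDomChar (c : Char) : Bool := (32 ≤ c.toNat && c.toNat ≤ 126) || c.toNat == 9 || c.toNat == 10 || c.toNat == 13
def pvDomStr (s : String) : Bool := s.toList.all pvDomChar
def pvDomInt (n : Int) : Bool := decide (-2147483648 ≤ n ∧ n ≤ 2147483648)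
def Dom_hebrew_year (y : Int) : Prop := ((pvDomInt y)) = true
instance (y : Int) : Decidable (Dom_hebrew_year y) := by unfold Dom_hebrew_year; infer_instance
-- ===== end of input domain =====

-- B replaces A's greedy subtraction loop over a 22-entry value table by direct digit
-- extraction (y//100, y//10%10, y%10) with three 10-entry lookup tables (objective: simpler).

-- ===== PORT A =====
-- Strings are handled as List Char internally (PySem convention; Lean's String ops are
-- kernel-opaque) and packed with String.ofList at the end.
def hyMapping : List (Int × List Char) :=
  [(400, ['ת']), (300, ['ש']), (200, ['ר']), (100, ['ק']),
   (90, ['צ']), (80, ['פ']), (70, ['ע']), (60, ['ס']), (50, ['נ']),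
   (40, ['מ']), (30, ['ל']), (20, ['כ']), (10, ['י']),
   (9, ['ט']), (8, ['ח']), (7, ['ז']), (6, ['ו']), (5, ['ה']),
   (4, ['ד']), (3, ['ג']), (2, ['ב']), (1, ['א'])]

-- the inner 'while y >= v' loop; fuel 1000 strictly exceeds the iteration count
-- (after 'y %= 1000' we have y < 1000 and every v ≥ 1, so the loop runs y // v < 1000 times)
def hyWhile (v : Int) (l : List Char) : Nat → Int → List Char → Int × List Char
  | 0, y, r => (y, r)
  | n + 1, y, r => if v ≤ y then hyWhile v l n (y - v) (r ++ l) else (y, r)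

-- the body after 'y %= 1000'
def hyCoreA (y : Int) : String :=
  let st := hyMapping.foldl (fun (s : Int × List Char) (p : Int × List Char) =>
    hyWhile p.1 p.2 1000 s.1 s.2) (y, [])
  let r := st.2
  match PySem.List.pyGet? r (-1) with          -- result[-1]; none = IndexError, outside Pre_
  | some c => String.ofList (PySem.List.slice r none (some (-1)) ++ '״' :: [c])
  | none => ""

def hebrew_year (y : Int) : String := hyCoreA (PySem.Int.mod y 1000)

-- ===== PORT B =====
def hyH : List (List Char) :=
  [[], ['ק'], ['ר'], ['ש'], ['ת'], ['ת','ק'], ['ת','ר'], ['ת','ש'], ['ת','ת'], ['ת','ת','ק']]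
def hyT : List (List Char) :=
  [[], ['י'], ['כ'], ['ל'], ['מ'], ['נ'], ['ס'], ['ע'], ['פ'], ['צ']]
def hyU : List (List Char) :=
  [[], ['א'], ['ב'], ['ג'], ['ד'], ['ה'], ['ו'], ['ז'], ['ח'], ['ט']]

-- the body after 'y %= 1000' (list indices are always in 0..9 there, so pyGetD is exact)
def hyCoreB (y : Int) : String :=
  let r := PySem.List.pyGetD hyH (PySem.Int.floordiv y 100) []
        ++ PySem.List.pyGetD hyT (PySem.Int.mod (PySem.Int.floordiv y 10) 10) []
        ++ PySem.List.pyGetD hyU (PySem.Int.mod y 10) []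
  match PySem.List.pyGet? r (-1) with
  | some c => String.ofList (PySem.List.slice r none (some (-1)) ++ '״' :: [c])
  | none => ""

def hebrew_year_alt (y : Int) : String := hyCoreB (PySem.Int.mod y 1000)

-- ===== PRECONDITION & SPEC =====
-- Pre_ excludes exactly y % 1000 == 0, where the Python A raises IndexError (result[-1] on "").
def Pre_hebrew_year (y : Int) : Prop := PySem.Int.mod y 1000 ≠ 0
instance (y : Int) : Decidable (Pre_hebrew_year y) := by unfold Pre_hebrew_year; infer_instance
def pvWitness_hebrew_year : Int := (5784)

def Spec_hebrew_year (y : Int) (out : String) : Prop := out = hebrew_year_alt y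
instance (y : Int) (out : String) : Decidable (Spec_hebrew_year y out) := by unfold Spec_hebrew_year; infer_instance

-- ===== CLAIM (what is proved, stated in full; the proofs are below) =====
def Claim_equal_hebrew_year : Prop := ∀ (y : Int), Dom_hebrew_year y → Pre_hebrew_year y → Spec_hebrew_year y (hebrew_year y)

-- ===== LEMMAS AND PROOFS =====

-- exhaustive check of the two cores on the whole residue range 0..999
set_option maxRecDepth 10000 in
lemma hyCore_eq : ∀ n : Fin 1000, hyCoreA ((n : Nat) : Int) = hyCoreB ((n : Nat) : Int) := by
  decide

-- ===== VERDICT (by name: the statement is the Claim_ definition above) =====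
theorem hebrew_year_spec : Claim_equal_hebrew_year := by
  intro y _ _
  unfold Spec_hebrew_year hebrew_year hebrew_year_alt
  have h1 : (0:Int) < 1000 := by norm_num
  have hm : PySem.Int.mod y 1000 = y % 1000 := PySem.Int.mod_eq_emod_of_pos h1
  have h0 : 0 ≤ y % 1000 := Int.emod_nonneg y (by norm_num)
  have hlt : y % 1000 < 1000 := Int.emod_lt_of_pos y h1
  have hfin : (y % 1000).toNat < 1000 := by omega
  have := hyCore_eq ⟨(y % 1000).toNat, hfin⟩
  simpa [hm, Int.toNat_of_nonneg h0] using this
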